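-- pv_equiv track=rewrite | github.com/jwg4/oeis_misc | A294381.py | A294381
-- ===== SOURCE A (Python) =====
-- def A294381(n):
--     a = [1, 3]
--     b = [2]
--     for i in a:
--         yield i
--     for m in range(2, n):
--         a_ = a[m-1]*b[m-2]
--         yield a_
--         a.append(a_)
--         if len(b) < n + 2:
--             for i in range(a[m-1]+1, a_):
--                 b.append(i)
-- ===== SOURCE B (Python) =====
-- def A294381(n):
--     # Lazy complement stream: a set of seen a-values plus an ascending counter
--     # replaces A's materialised list b of complement values.
--     yield 1
--     yield 3
--     aset = {1, 3}
--     prev = 3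
--     c = 2
--     for _ in range(2, n):
--         while c in aset:
--             c += 1
--         a_ = prev * c
--         c += 1
--         yield a_
--         aset.add(a_)
--         prev = a_
-- ===== Notes on version B (the rewrite author's own statement) =====
-- stated objective: alternative
-- what changed: B drops A's materialised complement list b (filled by bulk range appends) and instead keeps a membership set of the seen a-values plus an ascending counter, lazily skipping to the next integer not in the set for each term; running time is dominated by the same huge-integer products in both, so B trades A's large intermediate list for constant per-term state without being measurably faster.
import Mathlib
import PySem

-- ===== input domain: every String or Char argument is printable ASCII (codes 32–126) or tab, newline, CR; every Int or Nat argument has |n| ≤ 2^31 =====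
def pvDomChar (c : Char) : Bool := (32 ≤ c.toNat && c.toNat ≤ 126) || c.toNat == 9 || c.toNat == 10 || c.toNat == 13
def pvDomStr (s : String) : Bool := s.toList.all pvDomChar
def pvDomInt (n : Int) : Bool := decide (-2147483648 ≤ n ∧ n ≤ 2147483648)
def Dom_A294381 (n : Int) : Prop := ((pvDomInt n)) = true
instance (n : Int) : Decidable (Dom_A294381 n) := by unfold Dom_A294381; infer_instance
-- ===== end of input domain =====

-- B replaces A's materialised complement list b (bulk range fills) by a lazy complement
-- stream: a membership set of the a-values plus an ascending counter (objective: alternative).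

-- ===== PORT A =====
-- loop body of A's 'for m in range(2, n)' loop, as a named helper (state: (a, b, out));
-- a[m-1] / b[m-2] are always in range when reached, so the total pyGetD form is exact here
def stepA (n : Int) (s : List Int × List Int × List Int) (m : Int) :
    List Int × List Int × List Int :=
  match s with
  | (a, b, out) =>
    let a_ := (PySem.List.pyGetD a (m-1) 0) * (PySem.List.pyGetD b (m-2) 0)
    let out := out ++ [a_]
    let a := a ++ [a_]
    let b := if (b.length : Int) < n + 2 then
        (PySem.List.pyRange ((PySem.List.pyGetD a (m-1) 0) + 1) a_ 1).foldl
          (fun b i => b ++ [i]) b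
      else b
    (a, b, out)

def A294381 (n : Int) : List Int :=
  let a : List Int := [1, 3]
  let b : List Int := [2]
  let out : List Int := a.foldl (fun out i => out ++ [i]) []   -- for i in a: yield i
  ((PySem.List.pyRange 2 n 1).foldl (stepA n) (a, b, out)).2.2

-- ===== PORT B =====
-- 'while c in aset: c += 1' — first value ≥ c not in the set
def nextFree (aset : PySem.Set Int) (c : Int) : Int :=
  if PySem.Set.contains aset c then nextFree aset (c+1) else c
termination_by (aset.filter (fun x => decide (c ≤ x))).length
decreasing_by
  rename_i h
  have hc : c ∈ aset := (PySem.Set.contains_iff aset c).mp h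
  have hsub : aset.filter (fun x => decide (c+1 ≤ x))
      = (aset.filter (fun x => decide (c ≤ x))).filter (fun x => decide (c+1 ≤ x)) := by
    rw [List.filter_filter]
    apply List.filter_congr
    intro x _
    by_cases hx : c + 1 ≤ x
    · have : c ≤ x := by omega
      simp [hx, this]
    · simp [hx]
  rw [hsub]
  apply List.length_filter_lt_length_iff_exists.mpr
  exact ⟨c, by simp [List.mem_filter, hc], by simp⟩

-- loop body of B's 'for _ in range(2, n)' loop (state: (aset, prev, c, out))
def stepB (s : PySem.Set Int × Int × Int × List Int) (_m : Int) :
    PySem.Set Int × Int × Int × List Int :=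
  match s with
  | (aset, prev, c, out) =>
    let c := nextFree aset c
    let a_ := prev * c
    let c := c + 1
    let out := out ++ [a_]
    let aset := PySem.Set.add aset a_
    (aset, a_, c, out)

def A294381_alt (n : Int) : List Int :=
  ((PySem.List.pyRange 2 n 1).foldl stepB
    (PySem.Set.ofList [1, 3], 3, 2, [1, 3])).2.2.2

-- ===== PRECONDITION & SPEC =====
def Spec_A294381 (n : Int) (out : List Int) : Prop := out = A294381_alt n
instance (n : Int) (out : List Int) : Decidable (Spec_A294381 n out) := by unfold Spec_A294381; infer_instance

-- ===== CLAIM (what is proved, stated in full; the proofs are below) =====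
def Claim_equal_A294381 : Prop := ∀ (n : Int), Dom_A294381 n → Spec_A294381 n (A294381 n)

-- ===== LEMMAS AND PROOFS =====

-- the ascending list of integers in [2, U) that are not values of the sequence a
def compL (a : List Int) (U : Int) : List Int :=
  (PySem.List.pyRange 2 U 1).filter (fun x => decide (x ∉ a))

-- joint loop invariant, entering iteration m:
-- both outputs equal the a-list; prev is its last element; aset is its membership set;
-- B has consumed exactly the m-2 complement values below c; A's list bA is the full
-- complement list below some already-produced bound U (U = prev while the guard is live)
def LoopInv (n m : Int) (a bA out : List Int) (aset : PySem.Set Int)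
    (prev c : Int) (outB : List Int) : Prop :=
  out = a ∧ outB = a ∧
  (∃ t, a = 1 :: 3 :: t) ∧
  ((a.length : Int) = m) ∧
  (∃ a₀, a = a₀ ++ [prev]) ∧
  (∀ x ∈ a, x ≤ prev) ∧
  (∀ x : Int, PySem.Set.contains aset x = decide (x ∈ a)) ∧
  2 ≤ c ∧
  ((compL a c).length : Int) = m - 2 ∧
  2 * m - 1 ≤ prev ∧
  ∃ U, 2 ≤ U ∧ U ≤ prev ∧ bA = compL a U ∧ m - 1 ≤ (bA.length : Int) ∧
    ((bA.length : Int) < n + 2 → U = prev)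

lemma nextFree_ge (aset : PySem.Set Int) (c : Int) : c ≤ nextFree aset c := by
  fun_induction nextFree with
  | case1 c h ih => omega
  | case2 c h => omega

lemma nextFree_not_mem (aset : PySem.Set Int) (c : Int) :
    PySem.Set.contains aset (nextFree aset c) = false := by
  fun_induction nextFree with
  | case1 c h ih => exact ih
  | case2 c h => simpa using h

lemma nextFree_mem_of_lt (aset : PySem.Set Int) (c : Int) :
    ∀ y, c ≤ y → y < nextFree aset c → PySem.Set.contains aset y = true := by
  fun_induction nextFree with
  | case1 c h ih =>
      intro y h1 h2
      rcases eq_or_lt_of_le h1 with rfl | hlt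
      · exact h
      · exact ih y (by omega) h2
  | case2 c h => intro y h1 h2; omega

lemma compL_prefix (a : List Int) (X Y : Int) (h : X ≤ Y) : compL a X <+: compL a Y := by
  by_cases h2 : 2 ≤ X
  · rw [compL, compL, PySem.List.pyRange_one_append 2 X Y h2 h, List.filter_append]
    exact ⟨_, rfl⟩
  · rw [compL, PySem.List.pyRange_one_eq_nil (by omega)]
    simp

lemma compL_append_big (a : List Int) (v U : Int) (h : U ≤ v) :
    compL (a ++ [v]) U = compL a U := by
  apply List.filter_congr
  intro x hx
  rw [PySem.List.mem_pyRange_one] at hx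
  have : x ≠ v := by omega
  simp [List.mem_append, this]

lemma compL_step (a : List Int) (aset : PySem.Set Int) (c : Int) (h2 : 2 ≤ c)
    (hmem : ∀ x : Int, PySem.Set.contains aset x = decide (x ∈ a)) :
    compL a (nextFree aset c + 1) = compL a c ++ [nextFree aset c] := by
  set f := nextFree aset c with hf
  have hcf : c ≤ f := nextFree_ge aset c
  rw [compL, compL, PySem.List.pyRange_one_append 2 c (f+1) h2 (by omega), List.filter_append]
  congr 1
  rw [PySem.List.pyRange_one_succ_right hcf, List.filter_append]
  have h1 : (PySem.List.pyRange c f 1).filter (fun x => decide (x ∉ a)) = [] := by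
    rw [List.filter_eq_nil_iff]
    intro x hx
    rw [PySem.List.mem_pyRange_one] at hx
    have hm := nextFree_mem_of_lt aset c x hx.1 hx.2
    rw [hmem] at hm
    simp at hm ⊢
    exact hm
  have h2' : List.filter (fun x => decide (x ∉ a)) [f] = [f] := by
    have hm := nextFree_not_mem aset c
    rw [hmem] at hm
    simp only [List.filter_cons, List.filter_nil]
    simp at hm
    rw [← hf] at hm
    simp [hm]
  rw [h1, h2']
  simp

lemma compL_length_lower (s : List Int) (U : Int) :
    (U - 2).toNat - s.length ≤ (compL (1 :: s ++ [U]) U).length := by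
  have hlen := List.length_eq_length_filter_add
    (l := PySem.List.pyRange 2 U 1) (fun x => decide (x ∉ (1 :: s ++ [U])))
  rw [PySem.List.length_pyRange_one] at hlen
  have hb : ((PySem.List.pyRange 2 U 1).filter
      (fun x => !decide (x ∉ (1 :: s ++ [U])))).length ≤ s.length := by
    set F := (PySem.List.pyRange 2 U 1).filter
      (fun x => !decide (x ∉ (1 :: s ++ [U]))) with hF
    have hnd : F.Nodup :=
      List.Sublist.nodup List.filter_sublist (PySem.List.nodup_pyRange_one 2 U)
    have hsub : F ⊆ s := by
      intro x hx
      rw [hF, List.mem_filter] at hx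
      obtain ⟨hxr, hxa⟩ := hx
      rw [PySem.List.mem_pyRange_one] at hxr
      simp only [Bool.not_eq_eq_eq_not, Bool.not_true, decide_eq_false_iff_not,
        not_not] at hxa
      simp only [List.mem_cons, List.mem_append] at hxa
      rcases hxa with (rfl | h1) | (rfl | h1)
      · exfalso; omega
      · exact h1
      · exfalso; omega
      · simp at h1
    calc F.length = F.toFinset.card := (List.toFinset_card_of_nodup hnd).symm
      _ ≤ s.toFinset.card := Finset.card_le_card (fun x hx => by
          simp only [List.mem_toFinset] at *; exact hsub hx)
      _ ≤ s.length := s.toFinset_card_le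
  unfold compL
  omega

lemma step_preserves (n m : Int) (a bA out : List Int) (aset : PySem.Set Int)
    (prev c : Int) (outB : List Int) (h2 : 2 ≤ m) (hmn : m < n)
    (h : LoopInv n m a bA out aset prev c outB) :
    LoopInv n (m+1) (stepA n (a, bA, out) m).1 (stepA n (a, bA, out) m).2.1
      (stepA n (a, bA, out) m).2.2 (stepB (aset, prev, c, outB) m).1
      (stepB (aset, prev, c, outB) m).2.1 (stepB (aset, prev, c, outB) m).2.2.1
      (stepB (aset, prev, c, outB) m).2.2.2 := by
  obtain ⟨hout, houtB, ⟨t, hat⟩, hlen, ⟨a₀, ha0⟩, hle, hmem, hc2, hcount, hgrow,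
    U, hU2, hUle, hbA, hbAlen, hguard⟩ := h
  set f := nextFree aset c with hfdef
  have hcf : c ≤ f := nextFree_ge aset c
  have hf2 : 2 ≤ f := le_trans hc2 hcf
  have hprev3 : 3 ≤ prev := by omega
  have hmul2 : prev * 2 ≤ prev * f := by
    apply mul_le_mul_of_nonneg_left hf2 (by omega)
  have hmul3 : 3 * f ≤ prev * f := by
    apply mul_le_mul_of_nonneg_right hprev3 (by omega)
  have ha0len : a₀.length = (m-1).toNat := by
    have : a.length = a₀.length + 1 := by rw [ha0]; simp
    omega
  have hgetA : PySem.List.pyGetD a (m-1) 0 = prev := by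
    rw [PySem.List.pyGetD_eq_getElem a 0 (by omega) (by omega)]
    subst ha0
    simp [← ha0len]
  have hP : compL a (f+1) = compL a c ++ [f] := compL_step a aset c hc2 hmem
  have hPlen' : (compL a (f+1)).length = (compL a c).length + 1 := by rw [hP]; simp
  have hbAlen' : m - 1 ≤ ((compL a U).length : Int) := by rw [← hbA]; exact hbAlen
  have hgetP : ∀ (hx : (m-2).toNat < (compL a (f+1)).length),
      (compL a (f+1))[(m-2).toNat] = f := by
    intro hx
    have hclen : (m-2).toNat = (compL a c).length := by omega
    simp only [hP]
    rw [List.getElem_append_right (by omega)]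
    simp [hclen]
  have hbAget : PySem.List.pyGetD bA (m-2) 0 = f := by
    rcases le_total (f+1) U with hle1 | hle1
    · obtain ⟨r, hr⟩ := compL_prefix a (f+1) U hle1
      rw [hbA, ← hr]
      rw [PySem.List.pyGetD_eq_getElem _ 0 (by omega) (by push_cast [List.length_append]; omega)]
      rw [List.getElem_append_left (by omega)]
      exact hgetP (by omega)
    · have heq : compL a U = compL a (f+1) :=
        List.IsPrefix.eq_of_length_le (compL_prefix a U (f+1) hle1) (by omega)
      rw [hbA, heq]
      rw [PySem.List.pyGetD_eq_getElem _ 0 (by omega) (by omega)]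
      exact hgetP (by omega)
  have hgetA2 : PySem.List.pyGetD (a ++ [prev * f]) (m-1) 0 = prev := by
    rw [PySem.List.pyGetD_eq_getElem _ 0 (by omega) (by simp; omega)]
    rw [List.getElem_append_left (by omega)]
    subst ha0
    simp [← ha0len]
  have hxa : ∀ x : Int, x ∈ aset ↔ x ∈ a := by
    intro x
    rw [← PySem.Set.contains_iff, hmem x]
    simp
  simp only [stepA, stepB, PySem.List.foldl_append_singleton, ← hfdef,
    hgetA, hbAget, hgetA2]
  refine ⟨by rw [hout], by rw [houtB], ⟨t ++ [prev * f], by rw [hat]; rfl⟩,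
    by simp; omega, ⟨a, rfl⟩, ?_, ?_, by omega, ?_, by omega, ?_⟩
  · intro x hx
    rcases List.mem_append.mp hx with hx | hx
    · have := hle x hx; omega
    · simp at hx; omega
  · intro x
    rw [Bool.eq_iff_iff]
    rw [PySem.Set.contains_iff, PySem.Set.mem_add]
    simp only [decide_eq_true_eq, List.mem_append, List.mem_singleton]
    rw [hxa x]
  · -- count
    rw [compL_append_big a (prev * f) (f+1) (by omega), hP]
    simp
    omega
  · -- the b-list clause
    split_ifs with hg
    · have hUp : U = prev := hguard hg
      have hbig : bA ++ PySem.List.pyRange (prev+1) (prev*f) 1 = compL (a ++ [prev*f]) (prev*f) := by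
        rw [compL_append_big a (prev*f) (prev*f) le_rfl]
        rw [compL, PySem.List.pyRange_one_append 2 (prev+1) (prev*f) (by omega) (by omega),
          List.filter_append]
        congr 1
        · rw [hbA, hUp, compL, PySem.List.pyRange_one_succ_right (by omega : (2:Int) ≤ prev),
            List.filter_append]
          have hpa : prev ∈ a := by rw [ha0]; simp
          have : List.filter (fun x => decide (x ∉ a)) [prev] = [] := by simp [hpa]
          rw [this, List.append_nil]
        · symm
          rw [List.filter_eq_self]
          intro x hx
          rw [PySem.List.mem_pyRange_one] at hx
          simp only [decide_eq_true_eq]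
          intro hmem2
          rcases hmem2 with hmem2
          have := hle x hmem2
          omega
      have hlow : (prev*f - 2).toNat - (3 :: t).length
          ≤ (compL (a ++ [prev*f]) (prev*f)).length := by
        rw [hat]; exact compL_length_lower (3 :: t) (prev*f)
      have hta : a.length = t.length + 2 := by rw [hat]; simp
      refine ⟨prev*f, by omega, le_rfl, hbig, ?_, fun _ => rfl⟩
      · rw [hbig]
        have hst : (3 :: t).length = t.length + 1 := by simp
        omega
    · refine ⟨U, hU2, by omega, ?_, by omega, fun hcon => absurd hcon (by omega)⟩
      rw [compL_append_big a (prev*f) U (by omega), hbA]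

lemma loop_outputs_eq (n : Int) (k : Nat) : ∀ (m : Int) (a bA out : List Int)
    (aset : PySem.Set Int) (prev c : Int) (outB : List Int),
    n - m ≤ (k : Int) → 2 ≤ m → LoopInv n m a bA out aset prev c outB →
    ((PySem.List.pyRange m n 1).foldl (stepA n) (a, bA, out)).2.2
      = ((PySem.List.pyRange m n 1).foldl stepB (aset, prev, c, outB)).2.2.2 := by
  induction k with
  | zero =>
      intro m a bA out aset prev c outB hk h2 hinv
      rw [PySem.List.pyRange_one_eq_nil (by omega)]
      obtain ⟨h1, h2', _⟩ := hinv
      simp [h1, h2']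
  | succ k ih =>
      intro m a bA out aset prev c outB hk h2 hinv
      by_cases hmn : m < n
      · rw [PySem.List.pyRange_one_cons hmn]
        simp only [List.foldl_cons]
        have hpres := step_preserves n m a bA out aset prev c outB h2 hmn hinv
        have hA : stepA n (a, bA, out) m
            = ((stepA n (a, bA, out) m).1, (stepA n (a, bA, out) m).2.1,
               (stepA n (a, bA, out) m).2.2) := rfl
        have hB : stepB (aset, prev, c, outB) m
            = ((stepB (aset, prev, c, outB) m).1, (stepB (aset, prev, c, outB) m).2.1,
               (stepB (aset, prev, c, outB) m).2.2.1,
               (stepB (aset, prev, c, outB) m).2.2.2) := rfl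
        rw [hA, hB]
        exact ih (m+1) _ _ _ _ _ _ _ (by omega) (by omega) hpres
      · rw [PySem.List.pyRange_one_eq_nil (by omega)]
        obtain ⟨h1, h2', _⟩ := hinv
        simp [h1, h2']

-- ===== VERDICT (by name: the statement is the Claim_ definition above) =====
theorem A294381_spec : Claim_equal_A294381 := by
  intro n _
  unfold Spec_A294381 A294381 A294381_alt
  simp only [List.foldl_cons, List.foldl_nil, List.nil_append]
  by_cases hn : n ≤ 2
  · rw [PySem.List.pyRange_one_eq_nil (by omega)]
    rfl
  · apply loop_outputs_eq n (n-2).toNat 2 _ _ _ _ _ _ _ (by omega) (by omega)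
    refine ⟨rfl, rfl, ⟨[], rfl⟩, by simp, ⟨[1], rfl⟩, ?_, ?_, by omega, ?_, by omega,
      3, by omega, by omega, by decide, by decide, fun _ => rfl⟩
    · intro x hx
      simp only [List.mem_cons, List.not_mem_nil] at hx
      rcases hx with rfl | rfl | h
      · omega
      · omega
      · exact absurd h (by simp)
    · intro x
      rw [Bool.eq_iff_iff]
      simp [PySem.Set.mem_ofList]
    · decide
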